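-- pv_equiv track=rewrite | github.com/sahilsnghai/standalone-rag | src/vector/evaluation.py | _faithfulness_check
-- ===== SOURCE A (Python) =====
-- from typing import Any, Dict, List, Union
--
-- def _faithfulness_check(answer: str, docs: List[Dict[str, Any]]) -> bool:
--     if not answer:
--         return False
--     context = " ".join(d.get("content", "") for d in docs)
--     words = answer.split()
--     for n in range(4, min(8, len(words) + 1)):
--         for i in range(len(words) - n + 1):
--             phrase = " ".join(words[i : i + n])
--             if phrase in context:
--                 return True
--     return False
-- ===== SOURCE B (Python) =====
-- from typing import Any, Dict, List
--
--
-- def _faithfulness_check(answer: str, docs: List[Dict[str, Any]]) -> bool: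
--     # Any matched phrase of 5-7 words contains a matched 4-word phrase, so only the
--     # 4-word windows matter; walk the suffixes of the word list, testing the first
--     # four words of each, instead of A's nested index loops over n = 4..7.
--     context = " ".join(d.get("content", "") for d in docs)
--     ws = answer.split()
--     while len(ws) >= 4:
--         if " ".join(ws[:4]) in context:
--             return True
--         ws = ws[1:]
--     return False
-- ===== Notes on version B (the rewrite author's own statement) =====
-- stated objective: alternative
-- what changed: B drops A's outer loop over phrase lengths n=4..7 (any matched longer phrase contains a matched 4-word phrase, proved) and replaces the index loops by a loop consuming the word list suffix by suffix, testing the first four words of each suffix.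
import Mathlib
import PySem

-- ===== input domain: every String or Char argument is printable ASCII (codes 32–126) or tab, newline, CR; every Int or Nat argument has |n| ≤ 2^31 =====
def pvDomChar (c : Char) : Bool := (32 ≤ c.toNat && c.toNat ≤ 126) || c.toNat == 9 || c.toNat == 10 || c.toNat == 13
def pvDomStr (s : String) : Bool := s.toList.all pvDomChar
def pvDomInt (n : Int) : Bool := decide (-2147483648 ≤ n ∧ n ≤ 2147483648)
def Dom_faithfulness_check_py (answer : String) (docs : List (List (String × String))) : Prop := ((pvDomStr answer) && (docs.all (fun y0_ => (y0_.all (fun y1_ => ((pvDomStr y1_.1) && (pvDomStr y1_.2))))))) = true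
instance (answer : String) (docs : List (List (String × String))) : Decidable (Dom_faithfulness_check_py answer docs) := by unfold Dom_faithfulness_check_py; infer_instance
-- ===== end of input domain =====

-- B replaces A's nested index loops over phrase lengths n = 4..7 by a walk over the
-- suffixes of the word list testing only the first four words of each (any matched
-- longer phrase contains a matched 4-word phrase, proved below).

-- ===== PORT A =====
def faithfulness_check_py (answer : String) (docs : List (List (String × String))) : Bool :=
  if answer = "" then false
  else
    let context := PySem.Str.join " " (docs.map (fun d => (PySem.Dict.mk d).getD "content" ""))
    let words := PySem.Str.split₀ answer
    (PySem.List.pyRange 4 (min 8 ((words.length : Int) + 1)) 1).any (fun n =>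
      (PySem.List.pyRange 0 ((words.length : Int) - n + 1) 1).any (fun i =>
        PySem.Str.isIn (PySem.Str.join " " (PySem.List.slice words (some i) (some (i + n)))) context))

-- ===== PORT B =====
-- the while-loop of Source B; ws[:4] and ws[1:] are the nonnegative list slices take 4 / drop 1 (exact)
def fcSuffixWalk (context : String) (ws : List String) : Bool :=
  if ws.length < 4 then false
  else if PySem.Str.isIn (PySem.Str.join " " (ws.take 4)) context then true
  else fcSuffixWalk context (ws.drop 1)
termination_by ws.length
decreasing_by simp; omega

def faithfulness_check_py_alt (answer : String) (docs : List (List (String × String))) : Bool :=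
  let context := PySem.Str.join " " (docs.map (fun d => (PySem.Dict.mk d).getD "content" ""))
  fcSuffixWalk context (PySem.Str.split₀ answer)

-- ===== PRECONDITION & SPEC =====
def Spec_faithfulness_check_py (answer : String) (docs : List (List (String × String))) (out : Bool) : Prop := out = faithfulness_check_py_alt answer docs
instance (answer : String) (docs : List (List (String × String))) (out : Bool) : Decidable (Spec_faithfulness_check_py answer docs out) := by unfold Spec_faithfulness_check_py; infer_instance

-- ===== CLAIM (what is proved, stated in full; the proofs are below) =====
def Claim_equal_faithfulness_check_py : Prop := ∀ (answer : String) (docs : List (List (String × String))), Dom_faithfulness_check_py answer docs → Spec_faithfulness_check_py answer docs (faithfulness_check_py answer docs)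

-- ===== LEMMAS AND PROOFS =====

-- joining a nonempty prefix of the part list yields a prefix of the full join
theorem chars_join_prefix (sep : List Char) (xs ys : List (List Char)) (h : xs ≠ []) :
    PySem.Chars.join sep xs <+: PySem.Chars.join sep (xs ++ ys) := by
  induction xs with
  | nil => exact absurd rfl h
  | cons a rest ih =>
    cases rest with
    | nil =>
      cases ys with
      | nil => simp
      | cons c ys' =>
        rw [List.singleton_append, PySem.Chars.join_cons_cons, PySem.Chars.join_singleton]
        exact ⟨sep ++ PySem.Chars.join sep (c :: ys'), by simp⟩
    | cons b rest' =>
      rw [List.cons_append, PySem.Chars.join_cons_cons, List.cons_append,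
          PySem.Chars.join_cons_cons, ← List.cons_append]
      obtain ⟨t, ht⟩ := ih (by simp)
      exact ⟨t, by simp [List.append_assoc, ht]⟩

-- if an n-word window (n ≥ 4) matches the context, so does its 4-word prefix window
theorem window4_of_window (words : List String) (context : String) (ii nn : Nat)
    (h4 : 4 ≤ nn) (hle : ii + nn ≤ words.length)
    (h : PySem.Str.isIn (PySem.Str.join " "
          (PySem.List.slice words (some (ii : Int)) (some ((ii : Int) + (nn : Int))))) context = true) :
    PySem.Str.isIn (PySem.Str.join " " ((words.drop ii).take 4)) context = true := by
  have e1 : ((ii : Int) + (nn : Int)) = ((ii + nn : Nat) : Int) := by push_cast; ring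
  rw [e1, PySem.List.slice_natCast, Nat.add_sub_cancel_left] at h
  have hne : (words.drop ii).take 4 ≠ [] := by
    intro h0
    have := congrArg List.length h0
    rw [List.length_take, List.length_drop] at this
    simp at this
    omega
  have hpre4 : (words.drop ii).take 4 <+: (words.drop ii).take nn := by
    have : (words.drop ii).take 4 = ((words.drop ii).take nn).take 4 := by
      rw [List.take_take, Nat.min_eq_left h4]
    rw [this]; exact List.take_prefix _ _
  obtain ⟨rest4, hrest⟩ := hpre4
  rw [PySem.Str.isIn_iff_infix] at h ⊢
  have hpre : (PySem.Str.join " " ((words.drop ii).take 4)).toList <+: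
      (PySem.Str.join " " ((words.drop ii).take nn)).toList := by
    rw [PySem.Str.toList_join, PySem.Str.toList_join, ← hrest, List.map_append]
    exact chars_join_prefix _ _ _ (by simpa using hne)
  exact (List.IsPrefix.isInfix hpre).trans h

-- the suffix walk returns true iff some 4-word window matches
theorem fcSuffixWalk_iff (context : String) (ws : List String) :
    fcSuffixWalk context ws = true ↔
      ∃ k, k + 4 ≤ ws.length ∧
        PySem.Str.isIn (PySem.Str.join " " ((ws.drop k).take 4)) context = true := by
  induction ws with
  | nil =>
    rw [fcSuffixWalk]
    simp
  | cons a t ih =>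
    rw [fcSuffixWalk]
    by_cases hlen : (a :: t).length < 4
    · rw [if_pos hlen]
      simp only [Bool.false_eq_true, false_iff]
      rintro ⟨k, hk, -⟩
      simp only [List.length_cons] at hlen hk
      omega
    · rw [if_neg hlen]
      by_cases hm : PySem.Str.isIn (PySem.Str.join " " ((a :: t).take 4)) context = true
      · rw [if_pos hm]
        simp only [true_iff]
        exact ⟨0, by simpa using Nat.not_lt.mp hlen, by simpa using hm⟩
      · rw [if_neg hm]
        simp only [List.drop_one, List.tail_cons]
        rw [ih]
        constructor
        · rintro ⟨k, hk, hP⟩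
          exact ⟨k + 1, by simpa using hk, by simpa using hP⟩
        · rintro ⟨k, hk, hP⟩
          cases k with
          | zero => exact absurd (by simpa using hP) hm
          | succ k' => exact ⟨k', by simpa using hk, by simpa using hP⟩

theorem main_eq (answer : String) (docs : List (List (String × String))) :
    faithfulness_check_py answer docs = faithfulness_check_py_alt answer docs := by
  by_cases hempty : answer = ""
  · subst hempty
    have hs : PySem.Str.split₀ "" = [] := by decide
    simp only [faithfulness_check_py, faithfulness_check_py_alt, hs]
    rw [fcSuffixWalk]
    simp
  · simp only [faithfulness_check_py, faithfulness_check_py_alt, if_neg hempty]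
    generalize PySem.Str.join " " (docs.map (fun d => (PySem.Dict.mk d).getD "content" "")) = context
    generalize PySem.Str.split₀ answer = words
    rw [Bool.eq_iff_iff, fcSuffixWalk_iff]
    simp only [List.any_eq_true]
    constructor
    · rintro ⟨n, hn, i, hi, hP⟩
      rw [PySem.List.mem_pyRange_one] at hn hi
      obtain ⟨nn, rfl⟩ := Int.eq_ofNat_of_zero_le (by omega : (0 : Int) ≤ n)
      obtain ⟨ii, rfl⟩ := Int.eq_ofNat_of_zero_le hi.1
      exact ⟨ii, by omega, window4_of_window words context ii nn (by omega) (by omega) hP⟩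
    · rintro ⟨k, hk, hP⟩
      refine ⟨4, ?_, (k : Int), ?_, ?_⟩
      · rw [PySem.List.mem_pyRange_one]; omega
      · rw [PySem.List.mem_pyRange_one]; omega
      · have e : ((k : Int) + 4) = ((k : Int) + ((4 : Nat) : Int)) := by norm_num
        rw [e, PySem.List.slice_natCast_add]
        exact hP

-- ===== VERDICT (by name: the statement is the Claim_ definition above) =====
theorem faithfulness_check_py_spec : Claim_equal_faithfulness_check_py := by
  intro answer docs _
  unfold Spec_faithfulness_check_py
  exact main_eq answer docs
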